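-- pv_equiv track=rewrite | github.com/onjas-6/Benfords-exploration | src/sampler.py | group_by_offset
-- ===== SOURCE A (Python) =====
-- from typing import List, Tuple, Optional
--
-- def group_by_offset(
--
--     entries: List[Tuple[int, int, str]]
-- ) -> List[Tuple[int, List[Tuple[int, str]]]]:
--     """
--     Group entries by BZ2 block offset.
--
--     Multiple articles can share the same BZ2 block offset.
--     This groups them together for efficient decompression.
--
--     Args:
--         entries: List of (offset, article_id, title) tuples
--
--     Returns:
--         List of (offset, [(article_id, title), ...]) tuples
--     """
--     from collections import defaultdict
--
--     offset_map = defaultdict(list)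
--
--     for offset, article_id, title in entries:
--         offset_map[offset].append((article_id, title))
--
--     # Return as sorted list
--     return sorted(offset_map.items())
-- ===== SOURCE B (Python) =====
-- from itertools import groupby
-- from typing import List, Tuple
--
--
-- def group_by_offset(
--     entries: List[Tuple[int, int, str]]
-- ) -> List[Tuple[int, List[Tuple[int, str]]]]:
--     result = []
--     for offset, group in groupby(sorted(entries, key=lambda e: e[0]),
--                                  key=lambda e: e[0]):
--         result.append((offset, [(article_id, title) for _, article_id, title in group]))
--     return result
-- ===== Notes on version B (the rewrite author's own statement) =====
-- stated objective: alternative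
-- what changed: Replaced the defaultdict-accumulate-then-sort-items strategy by a stable sort of the entries by offset followed by a single linear itertools.groupby pass that emits each (offset, group) directly.
import Mathlib
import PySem

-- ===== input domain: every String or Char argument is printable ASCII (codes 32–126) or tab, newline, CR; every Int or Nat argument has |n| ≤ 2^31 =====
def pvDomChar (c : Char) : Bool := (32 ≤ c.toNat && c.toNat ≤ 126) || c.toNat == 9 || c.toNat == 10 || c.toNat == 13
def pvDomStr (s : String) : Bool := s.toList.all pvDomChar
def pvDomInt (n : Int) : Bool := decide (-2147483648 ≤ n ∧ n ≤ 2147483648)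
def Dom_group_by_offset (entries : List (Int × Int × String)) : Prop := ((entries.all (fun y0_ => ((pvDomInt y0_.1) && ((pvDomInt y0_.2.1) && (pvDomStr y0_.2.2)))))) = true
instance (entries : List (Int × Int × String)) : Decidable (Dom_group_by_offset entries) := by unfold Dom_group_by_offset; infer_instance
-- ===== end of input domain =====

-- B replaces A's dict-accumulate-then-sort-items by a stable sort by offset plus one
-- linear groupby pass (alternative decomposition, same result).

-- ===== PORT A =====
def group_by_offset (entries : List (Int × Int × String)) : List (Int × (List (Int × String))) :=
  let offset_map : PySem.Dict Int (List (Int × String)) :=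
    entries.foldl (fun d e => d.modify e.1 [] (fun v => v ++ [(e.2.1, e.2.2)])) PySem.Dict.empty
  -- sorted(offset_map.items()): dict keys are distinct, so Python's pair comparison
  -- never consults the second component; sorting by the key alone is exact here.
  PySem.List.sorted offset_map.items (fun p => p.1) false

-- ===== PORT B =====
-- itertools.groupby on a key-sorted list: one run (head + takeWhile) per step.
def pvGroupby : List (Int × Int × String) → List (Int × (List (Int × String)))
  | [] => []
  | e :: rest =>
      (e.1, (e.2.1, e.2.2) :: (rest.takeWhile (fun x => x.1 == e.1)).map (fun x => (x.2.1, x.2.2)))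
        :: pvGroupby (rest.dropWhile (fun x => x.1 == e.1))
termination_by s => s.length
decreasing_by
  simp only [List.length_cons]
  exact Nat.lt_succ_of_le (List.Sublist.length_le (List.dropWhile_sublist _))

def group_by_offset_alt (entries : List (Int × Int × String)) : List (Int × (List (Int × String))) :=
  pvGroupby (PySem.List.sorted entries (fun e => e.1) false)

-- ===== PRECONDITION & SPEC =====
def Spec_group_by_offset (entries : List (Int × Int × String)) (out : List (Int × (List (Int × String)))) : Prop := out = group_by_offset_alt entries
instance (entries : List (Int × Int × String)) (out : List (Int × (List (Int × String)))) : Decidable (Spec_group_by_offset entries out) := by unfold Spec_group_by_offset; infer_instance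

-- ===== CLAIM (what is proved, stated in full; the proofs are below) =====
def Claim_equal_group_by_offset : Prop := ∀ (entries : List (Int × Int × String)), Dom_group_by_offset entries → Spec_group_by_offset entries (group_by_offset entries)

-- ===== LEMMAS AND PROOFS =====

-- pushing a head absent from the input through a Set-building fold
theorem pv_foldl_add_cons (k : Int) (l : List Int) (h : ∀ x ∈ l, x ≠ k) :
    ∀ acc : List Int, l.foldl PySem.Set.add (k :: acc) = k :: l.foldl PySem.Set.add acc := by
  induction l with
  | nil => intro acc; rfl
  | cons x xs ih =>
    intro acc
    have hx : x ≠ k := h x (by simp)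
    have hxs : ∀ y ∈ xs, y ≠ k := fun y hy => h y (by simp [hy])
    have hadd : PySem.Set.add (k :: acc) x = k :: PySem.Set.add acc x := by
      simp only [PySem.Set.add, PySem.Set.contains, List.contains_cons]
      have hkx : (x == k) = false := by simp [hx]
      rw [hkx]
      simp only [Bool.false_or]
      split <;> simp
    simp only [List.foldl_cons, hadd, ih hxs]

-- Set.ofList of a run of k followed by non-k elements
theorem pv_ofList_run (k : Int) (ts rs : List Int) (ht : ∀ x ∈ ts, x = k) (hr : ∀ x ∈ rs, x ≠ k) :
    PySem.Set.ofList (k :: (ts ++ rs)) = k :: PySem.Set.ofList rs := by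
  have h1 : ∀ ts' : List Int, (∀ x ∈ ts', x = k) → ts'.foldl PySem.Set.add [k] = [k] := by
    intro ts' hts
    induction ts' with
    | nil => rfl
    | cons x xs ih =>
      have hx : x = k := hts x (by simp)
      have : PySem.Set.add [k] x = [k] := by
        simp [PySem.Set.add, PySem.Set.contains, hx]
      simp only [List.foldl_cons, this]
      exact ih (fun y hy => hts y (by simp [hy]))
  show (k :: (ts ++ rs)).foldl PySem.Set.add PySem.Set.empty = _
  have hek : PySem.Set.add PySem.Set.empty k = [k] := rfl
  simp only [List.foldl_cons, hek, List.foldl_append, h1 ts ht]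
  exact pv_foldl_add_cons k rs hr []

-- Set.ofList is a sublist of its input
theorem pv_foldl_add_sublist (l : List Int) : ∀ acc : List Int, List.Sublist (l.foldl PySem.Set.add acc) (acc ++ l) := by
  induction l with
  | nil => intro acc; simp
  | cons x xs ih =>
    intro acc
    have h1 : List.Sublist (PySem.Set.add acc x) (acc ++ [x]) := by
      simp only [PySem.Set.add]
      split
      · exact (List.sublist_append_left acc [x])
      · exact List.Sublist.refl _
    have h2 : List.Sublist ((x :: xs).foldl PySem.Set.add acc) ((PySem.Set.add acc x) ++ xs) := ih _
    have h3 := h2.trans (h1.append_right xs)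
    simpa using h3

theorem pv_insertBy_pairwise {α : Type} (key : α → Int) (x : α) (acc : List α)
    (h : acc.Pairwise (fun a b => key a ≤ key b)) :
    (PySem.List.insertBy (fun a b => decide (key a < key b)) x acc).Pairwise (fun a b => key a ≤ key b) := by
  induction acc with
  | nil => simp [PySem.List.insertBy]
  | cons y ys ih =>
    rcases List.pairwise_cons.mp h with ⟨hy, hys⟩
    simp only [PySem.List.insertBy]
    split
    · rename_i hlt
      simp only [decide_eq_true_eq] at hlt
      refine List.pairwise_cons.mpr ⟨?_, h⟩
      intro z hz
      rcases List.mem_cons.mp hz with rfl | hz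
      · exact le_of_lt hlt
      · exact le_trans (le_of_lt hlt) (hy z hz)
    · rename_i hnlt
      simp only [decide_eq_true_eq] at hnlt
      refine List.pairwise_cons.mpr ⟨?_, ih hys⟩
      intro z hz
      rcases (PySem.List.mem_insertBy _ x z ys).mp hz with rfl | hz
      · exact le_of_not_gt hnlt
      · exact hy z hz

-- a stable insertion lands after every element of its own key class
theorem pv_insertBy_filter {α : Type} (key : α → Int) (k : Int) (x : α) (acc : List α)
    (h : acc.Pairwise (fun a b => key a ≤ key b)) :
    (PySem.List.insertBy (fun a b => decide (key a < key b)) x acc).filter (fun e => key e == k)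
      = acc.filter (fun e => key e == k) ++ (if key x == k then [x] else []) := by
  induction acc with
  | nil => simp [PySem.List.insertBy, List.filter]; split <;> simp_all
  | cons y ys ih =>
    rcases List.pairwise_cons.mp h with ⟨hy, hys⟩
    simp only [PySem.List.insertBy]
    split
    · rename_i hlt
      simp only [decide_eq_true_eq] at hlt
      by_cases hxk : key x = k
      · have hnil : (y :: ys).filter (fun e => key e == k) = [] := by
          apply List.filter_eq_nil_iff.mpr
          intro z hz
          have : key x < key z := by
            rcases List.mem_cons.mp hz with rfl | hz
            · exact hlt
            · exact lt_of_lt_of_le hlt (hy z hz)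
          simp only [beq_iff_eq]
          omega
        rw [List.filter_cons_of_pos (by simp [hxk]), hnil]
        simp [hxk]
      · rw [List.filter_cons_of_neg (by simp [hxk])]
        simp [hxk]
    · rename_i hnlt
      rw [List.filter_cons, List.filter_cons, ih hys]
      split <;> simp

theorem pv_foldl_insertBy_filter {α : Type} (key : α → Int) (k : Int) :
    ∀ (xs : List α) (acc : List α), acc.Pairwise (fun a b => key a ≤ key b) →
    (xs.foldl (fun a x => PySem.List.insertBy (fun a b => decide (key a < key b)) x a) acc).filter (fun e => key e == k)
      = acc.filter (fun e => key e == k) ++ xs.filter (fun e => key e == k) := by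
  intro xs
  induction xs with
  | nil => intro acc _; simp
  | cons x xs ih =>
    intro acc hacc
    simp only [List.foldl_cons]
    rw [ih _ (pv_insertBy_pairwise key x acc hacc), pv_insertBy_filter key k x acc hacc,
        List.filter_cons]
    split <;> simp

-- stability: filtering one key class commutes with the stable sort
theorem pv_filter_sorted (entries : List (Int × Int × String)) (k : Int) :
    (PySem.List.sorted entries (fun e => e.1) false).filter (fun e => e.1 == k)
      = entries.filter (fun e => e.1 == k) := by
  rw [PySem.List.sorted_eq_foldl_insertBy]
  simpa using pv_foldl_insertBy_filter (fun e => e.1) k entries [] (by simp)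

theorem pv_dropWhile_key_gt (k : Int) (l : List (Int × Int × String))
    (hall : ∀ x ∈ l, k ≤ x.1) (hp : l.Pairwise (fun a b => a.1 ≤ b.1)) :
    ∀ x ∈ l.dropWhile (fun x => x.1 == k), k < x.1 := by
  induction l with
  | nil => simp
  | cons y ys ih =>
    rcases List.pairwise_cons.mp hp with ⟨hy, hys⟩
    by_cases hyk : y.1 = k
    · rw [List.dropWhile_cons_of_pos (by simp [hyk])]
      exact ih (fun x hx => hall x (by simp [hx])) hys
    · rw [List.dropWhile_cons_of_neg (by simp [hyk])]
      intro x hx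
      have hky : k < y.1 := lt_of_le_of_ne (hall y (by simp)) (Ne.symm hyk)
      rcases List.mem_cons.mp hx with rfl | hx
      · exact hky
      · exact lt_of_lt_of_le hky (hy x hx)

-- groupby on a key-sorted list = one (k, filter) pair per distinct key
theorem pv_groupby_char : ∀ s : List (Int × Int × String), s.Pairwise (fun a b => a.1 ≤ b.1) →
    pvGroupby s = (PySem.Set.ofList (s.map (fun e => e.1))).map
      (fun k => (k, (s.filter (fun e => e.1 == k)).map (fun e => (e.2.1, e.2.2)))) := by
  intro s
  induction s using pvGroupby.induct with
  | case1 => intro _; simp [pvGroupby]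
  | case2 e rest ih =>
    intro hp
    rcases List.pairwise_cons.mp hp with ⟨he, hrest⟩
    set t := rest.takeWhile (fun x => x.1 == e.1) with htdef
    set r := rest.dropWhile (fun x => x.1 == e.1) with hrdef
    have hsplit : t ++ r = rest := List.takeWhile_append_dropWhile
    have ht : ∀ x ∈ t, x.1 = e.1 := by
      intro x hx
      rw [htdef] at hx
      have h1 := List.mem_takeWhile_imp hx
      simpa using h1
    have hr : ∀ x ∈ r, e.1 < x.1 :=
      pv_dropWhile_key_gt e.1 rest he hrest
    have hrpw : r.Pairwise (fun a b => a.1 ≤ b.1) := hrest.sublist (List.dropWhile_sublist _)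
    -- the distinct keys of e :: rest are e.1 followed by those of r
    have hset : PySem.Set.ofList ((e :: rest).map (fun x => x.1))
        = e.1 :: PySem.Set.ofList (r.map (fun x => x.1)) := by
      rw [← hsplit]
      simp only [List.map_cons, List.map_append]
      exact pv_ofList_run e.1 (t.map (fun x => x.1)) (r.map (fun x => x.1))
        (by intro x hx; rcases List.mem_map.mp hx with ⟨y, hy, rfl⟩; exact ht y hy)
        (by intro x hx; rcases List.mem_map.mp hx with ⟨y, hy, rfl⟩; exact ne_of_gt (hr y hy))
    -- the head group
    have hfilter_head : (e :: rest).filter (fun x => x.1 == e.1) = e :: t := by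
      rw [← hsplit, List.filter_cons_of_pos (by simp)]
      rw [List.filter_append]
      rw [List.filter_eq_self.mpr (fun x hx => by simp [ht x hx]),
          List.filter_eq_nil_iff.mpr (fun x hx => by simp [ne_of_gt (hr x hx)])]
      simp
    -- the remaining groups only see r
    have hfilter_tail : ∀ k ∈ PySem.Set.ofList (r.map (fun x => x.1)),
        (e :: rest).filter (fun x => x.1 == k) = r.filter (fun x => x.1 == k) := by
      intro k hk
      have hk' : k ∈ r.map (fun x => x.1) := (PySem.Set.mem_ofList _ _).mp hk
      rcases List.mem_map.mp hk' with ⟨y, hy, rfl⟩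
      have hek : e.1 < y.1 := hr y hy
      rw [← hsplit, List.filter_cons_of_neg (by simp; omega), List.filter_append,
          List.filter_eq_nil_iff.mpr (fun x hx => by have := ht x hx; simp; omega)]
      simp
    rw [pvGroupby, hset, List.map_cons, ← htdef, ← hrdef]
    congr 1
    · rw [hfilter_head]; simp
    · rw [List.map_congr_left (fun k hk => by rw [hfilter_tail k hk]), ih hrpw]

-- A = sorted distinct offsets, each paired with its filtered group in entry order
theorem pv_A_char (entries : List (Int × Int × String)) :
    group_by_offset entries =
      (PySem.List.sorted (PySem.Set.ofList (entries.map (fun e => e.1))) (fun x => x) false).map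
        (fun k => (k, (entries.filter (fun e => e.1 == k)).map (fun e => (e.2.1, e.2.2)))) := by
  unfold group_by_offset
  set d := entries.foldl (fun d e => d.modify e.1 [] (fun v => v ++ [(e.2.1, e.2.2)]))
    (PySem.Dict.empty : PySem.Dict Int (List (Int × String))) with hd
  have hkeys : d.keys = PySem.Set.ofList (entries.map (fun e => e.1)) := by
    rw [hd]
    have := PySem.Dict.keys_foldl_modify_key entries (fun e : Int × Int × String => e.1) ([] : List (Int × String))
      (fun _ e => fun v => v ++ [(e.2.1, e.2.2)]) PySem.Dict.empty
    simpa [PySem.Set.update, PySem.Set.ofList] using this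
  have hnodup : d.keys.Nodup := by
    rw [hd]
    exact PySem.Dict.nodup_keys_foldl_modify_key entries (fun e : Int × Int × String => e.1) ([] : List (Int × String))
      (fun _ e => fun v => v ++ [(e.2.1, e.2.2)]) PySem.Dict.empty (by simp [PySem.Dict.empty, PySem.Dict.keys])
  have hgetD : ∀ k, d.getD k [] = (entries.filter (fun e => e.1 == k)).map (fun e => (e.2.1, e.2.2)) := by
    intro k
    have hfold : d = List.foldl (fun d p => d.modify p.1 [] (fun v => v ++ [p.2])) PySem.Dict.empty
        (entries.map (fun e : Int × Int × String => (e.1, (e.2.1, e.2.2)))) := by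
      rw [hd, List.foldl_map]
    rw [hfold, PySem.Dict.getD_foldl_modify_append]
    simp
  have hitems : d.items = (PySem.Set.ofList (entries.map (fun e => e.1))).map
      (fun k => (k, (entries.filter (fun e => e.1 == k)).map (fun e => (e.2.1, e.2.2)))) := by
    rw [PySem.Dict.items_eq_map_keys d hnodup []]
    rw [hkeys]
    exact List.map_congr_left (fun k _ => by rw [hgetD k])
  show PySem.List.sorted d.items (fun p => p.1) false = _
  rw [hitems]
  apply PySem.List.sorted_eq_of_perm_of_pairwise_lt
  · exact List.Perm.map _ (PySem.List.sorted_perm _ _ _)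
  · rw [List.pairwise_map]
    exact PySem.List.sorted_ofList_pairwise_lt _

-- the sorted distinct offsets are the distinct offsets of the sorted entries
theorem pv_sorted_ofList_eq (entries : List (Int × Int × String)) :
    PySem.List.sorted (PySem.Set.ofList (entries.map (fun e => e.1))) (fun x => x) false
      = PySem.Set.ofList ((PySem.List.sorted entries (fun e => e.1) false).map (fun e => e.1)) := by
  set s := PySem.List.sorted entries (fun e => e.1) false with hs
  have hperm : (s.map (fun e => e.1)).Perm (entries.map (fun e => e.1)) :=
    (PySem.List.sorted_perm entries (fun e => e.1) false).map _
  have hpw : (s.map (fun e => e.1)).Pairwise (· ≤ ·) := by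
    rw [List.pairwise_map]
    exact PySem.List.sorted_pairwise entries (fun e => e.1)
  have hsub : List.Sublist (PySem.Set.ofList (s.map (fun e => e.1))) (s.map (fun e => e.1)) := by
    have := pv_foldl_add_sublist (s.map (fun e => e.1)) []
    simpa [PySem.Set.ofList, PySem.Set.empty] using this
  have hpw' : (PySem.Set.ofList (s.map (fun e => e.1))).Pairwise (· ≤ ·) := hpw.sublist hsub
  have hnd : (PySem.Set.ofList (s.map (fun e => e.1))).Nodup := PySem.Set.nodup_ofList _
  have hlt : (PySem.Set.ofList (s.map (fun e => e.1))).Pairwise (· < ·) := by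
    have hand := hpw'.and hnd
    exact hand.imp (fun h => lt_of_le_of_ne h.1 h.2)
  apply PySem.List.sorted_eq_of_perm_of_pairwise_lt
  · apply (List.perm_ext_iff_of_nodup (PySem.Set.nodup_ofList _) (PySem.Set.nodup_ofList _)).mpr
    intro x
    rw [PySem.Set.mem_ofList, PySem.Set.mem_ofList]
    exact ⟨fun h => hperm.mem_iff.mp h, fun h => hperm.mem_iff.mpr h⟩
  · exact hlt

-- ===== VERDICT (by name: the statement is the Claim_ definition above) =====
theorem group_by_offset_spec : Claim_equal_group_by_offset := by
  intro entries _
  unfold Spec_group_by_offset group_by_offset_alt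
  rw [pv_A_char, pv_sorted_ofList_eq,
      pv_groupby_char _ (PySem.List.sorted_pairwise entries (fun e => e.1))]
  simp only [pv_filter_sorted]
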